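-- pv_equiv track=rewrite | github.com/andifilhohub/MinhaPasta | #Maria Fernanda Pagnoncelli Corso.py | word_separator
-- ===== SOURCE A (Python) =====
-- def word_separator(List):
--     newList = []
--     word = []
--     for i in range(len(List)):
--         if List[i] == ' ':
--             if ',' in word:
--                 word.remove(',')
--                 newList.append([''.join(str(number) for number in word)])
--             elif '.' in word:
--                 word.remove('.')
--                 newList.append([''.join(str(number) for number in word)])
--             else:
--                 newList.append([''.join(str(number) for number in word)])
--
--             word = []
--         else: word.append(List[i])
--     if ',' in word:
--         word.remove(',')
--         newList.append([''.join(str(number) for number in word)])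
--     elif'.' in word:
--         word.remove('.')
--         newList.append([''.join(str(number) for number in word)])
--     else:
--         newList.append([''.join(str(number) for number in word)])
--     return newList
-- ===== SOURCE B (Python) =====
-- def _clean(word):
--     target = ',' if ',' in word else '.'
--     out = []
--     skipped = False
--     for x in word:
--         if not skipped and x == target:
--             skipped = True
--         else:
--             out.append(str(x))
--     return [''.join(out)]
--
--
-- def word_separator(List):
--     if ' ' in List:
--         i = List.index(' ')
--         return [_clean(List[:i])] + word_separator(List[i+1:])
--     return [_clean(List)]
-- ===== Notes on version B (the rewrite author's own statement) =====
-- stated objective: alternative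
-- what changed: A builds words with an index loop over the whole list and a thrice-duplicated membership-test/remove/flush block; B recursively splits off the word before the first space with index+slices and cleans each word in one fused pass that skips the first target element (',' if present, else '.') while collecting the join input.
import Mathlib
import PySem

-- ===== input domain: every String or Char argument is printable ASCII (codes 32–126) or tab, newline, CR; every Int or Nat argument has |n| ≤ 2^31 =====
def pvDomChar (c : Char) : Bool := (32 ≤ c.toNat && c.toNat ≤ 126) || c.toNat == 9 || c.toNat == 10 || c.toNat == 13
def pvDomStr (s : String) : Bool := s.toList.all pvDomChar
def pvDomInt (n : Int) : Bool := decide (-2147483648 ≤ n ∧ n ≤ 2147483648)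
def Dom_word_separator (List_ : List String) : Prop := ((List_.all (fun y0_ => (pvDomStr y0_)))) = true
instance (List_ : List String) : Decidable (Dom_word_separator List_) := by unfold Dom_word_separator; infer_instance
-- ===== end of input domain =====

-- B recursively splits at the first space (index + slices) and cleans each word in one fused pass
-- that skips the first target element while collecting the join input — an alternative decomposition
-- replacing A's single index loop with its thrice-duplicated membership-test/remove/flush block.


-- ===== PORT A =====
-- A's flush block: if ',' in word: word.remove(','); append join … elif '.' … else append join.
-- str(number) is the identity on the string elements; ''.join is PySem.Str.join "".
-- remove? is guarded by the membership test, so its getD default is never used.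
def aFlush (word : List String) : List String :=
  if "," ∈ word then [PySem.Str.join "" ((PySem.List.remove? word ",").getD [])]
  else if "." ∈ word then [PySem.Str.join "" ((PySem.List.remove? word ".").getD [])]
  else [PySem.Str.join "" word]

def word_separator (List_ : List String) : List (List String) :=
  let st := List_.foldl
    (fun (st : List (List String) × List String) x =>
      if x = " " then (st.1 ++ [aFlush st.2], []) else (st.1, st.2 ++ [x]))
    ([], [])
  st.1 ++ [aFlush st.2]

-- ===== PORT B =====
-- Source B's _clean: target = ',' if ',' in word else '.'; one pass with a 'skipped' flag
-- collecting str(x) into out; returns [''.join(out)].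
def bClean (word : List String) : List String :=
  let target := if "," ∈ word then "," else "."
  let st := word.foldl
    (fun (st : List String × Bool) x =>
      if !st.2 && x = target then (st.1, true) else (st.1 ++ [x], st.2))
    ([], false)
  [PySem.Str.join "" st.1]

-- Source B's recursion: 'if " " in List: i = List.index(" "); [_clean(List[:i])] + rec(List[i+1:])';
-- the match on index? is that membership test plus .index (some i ↔ " " ∈ List_).
def word_separator_alt (List_ : List String) : List (List String) :=
  match h : PySem.List.index? List_ " " with
  | some i =>
      bClean (PySem.List.slice List_ none (some (i : Int))) ::
        word_separator_alt (PySem.List.slice List_ (some ((i : Int) + 1)) none)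
  | none => [bClean List_]
termination_by List_.length
decreasing_by
  have : ((i : Int) + 1) = ((i + 1 : Nat) : Int) := by push_cast; ring
  rw [this, PySem.List.slice_from_natCast]
  obtain ⟨hk, _, _⟩ := PySem.List.getElem_of_index?_eq_some h
  simp [List.length_drop]; omega

-- ===== PRECONDITION & SPEC =====
def Spec_word_separator (List_ : List String) (out : List (List String)) : Prop := out = word_separator_alt List_
instance (List_ : List String) (out : List (List String)) : Decidable (Spec_word_separator List_ out) := by unfold Spec_word_separator; infer_instance

-- ===== CLAIM (what is proved, stated in full; the proofs are below) =====
def Claim_equal_word_separator : Prop := ∀ (List_ : List String), Dom_word_separator List_ → Spec_word_separator List_ (word_separator List_)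

-- ===== LEMMAS AND PROOFS =====

-- canonical word splitting (keep empty words), the common reference point of both proofs
def pvWords : List String → List (List String)
  | [] => [[]]
  | x :: xs =>
      if x = " " then [] :: pvWords xs
      else match pvWords xs with
        | w :: ws => (x :: w) :: ws
        | [] => [[x]]

lemma pvWords_ne_nil (xs : List String) : pvWords xs ≠ [] := by
  cases xs with
  | nil => simp [pvWords]
  | cons x xs =>
      simp only [pvWords]
      split
      · simp
      · split <;> simp

-- B's skip-fold computes erase of the target
lemma skip_fold (t : String) (w : List String) :
    ∀ (acc : List String) (b : Bool),
    w.foldl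
      (fun (st : List String × Bool) x =>
        if !st.2 && x = t then (st.1, true) else (st.1 ++ [x], st.2))
      (acc, b) = (acc ++ (if b then w else w.erase t), b || decide (t ∈ w)) := by
  induction w with
  | nil => intro acc b; cases b <;> simp
  | cons x xs ih =>
      intro acc b
      rw [List.foldl_cons]
      by_cases hx : (!b && decide (x = t)) = true
      · simp only [Bool.and_eq_true, Bool.not_eq_eq_eq_not, Bool.not_true, decide_eq_true_eq] at hx
        obtain ⟨hb, hxt⟩ := hx
        subst hb; subst hxt
        rw [if_pos (by simp), ih]
        simp [List.erase_cons_head]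
      · rw [if_neg hx, ih]
        simp only [Bool.and_eq_true, Bool.not_eq_eq_eq_not, Bool.not_true, decide_eq_true_eq,
          not_and] at hx
        cases b with
        | true => simp
        | false =>
            have hxt : ¬ x = t := hx rfl
            have he : (x :: xs).erase t = x :: xs.erase t :=
              List.erase_cons_tail (by simpa using hxt)
            have hm : (t ∈ x :: xs) = (t ∈ xs) := by
              have hx2 : ¬ t = x := fun hh => hxt (Eq.symm hh)
              rw [List.mem_cons]
              simp [hx2]
            simp [he, hm]

lemma bClean_eq_aFlush (w : List String) : bClean w = aFlush w := by
  by_cases hc : "," ∈ w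
  · simp only [bClean, aFlush, hc, if_true]
    rw [skip_fold]
    simp [PySem.List.remove?_eq_some_erase w "," hc]
  · by_cases hd : "." ∈ w
    · simp only [bClean, aFlush, hc, hd, if_false, if_true]
      rw [skip_fold]
      simp [PySem.List.remove?_eq_some_erase w "." hd]
    · simp only [bClean, aFlush, hc, hd, if_false]
      rw [skip_fold]
      simp [List.erase_of_not_mem hd]

-- A's fold equals aFlush mapped over pvWords (generalized loop invariant)
lemma fold_A (xs : List String) (acc : List (List String)) (cur : List String) :
    (xs.foldl
      (fun (st : List (List String) × List String) x =>
        if x = " " then (st.1 ++ [aFlush st.2], []) else (st.1, st.2 ++ [x]))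
      (acc, cur)).1 ++
      [aFlush (xs.foldl
        (fun (st : List (List String) × List String) x =>
          if x = " " then (st.1 ++ [aFlush st.2], []) else (st.1, st.2 ++ [x]))
        (acc, cur)).2]
    = acc ++ (match pvWords xs with
        | w :: ws => ((cur ++ w) :: ws).map aFlush
        | [] => [aFlush cur]) := by
  induction xs generalizing acc cur with
  | nil => simp [pvWords]
  | cons x xs ih =>
      obtain ⟨w, ws, hws⟩ := List.exists_cons_of_ne_nil (pvWords_ne_nil xs)
      by_cases hx : x = " "
      · subst hx
        rw [List.foldl_cons, if_pos rfl, ih]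
        simp [pvWords, hws]
      · rw [List.foldl_cons, if_neg hx, ih]
        simp [pvWords, hx, hws]

lemma A_eq_words (xs : List String) :
    word_separator xs = (pvWords xs).map aFlush := by
  unfold word_separator
  have h := fold_A xs [] []
  simp only [List.nil_append] at h
  rw [h]
  obtain ⟨w, ws, hws⟩ := List.exists_cons_of_ne_nil (pvWords_ne_nil xs)
  rw [hws]

-- pvWords on a list with no space / with first space exposed
lemma pvWords_no_space (xs : List String) (h : " " ∉ xs) : pvWords xs = [xs] := by
  induction xs with
  | nil => rfl
  | cons x xs ih =>
      simp only [List.mem_cons, not_or] at h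
      have hx : ¬ x = " " := fun hh => h.1 (Eq.symm hh)
      simp [pvWords, hx, ih h.2]

lemma pvWords_split (pre suf : List String) (h : " " ∉ pre) :
    pvWords (pre ++ " " :: suf) = pre :: pvWords suf := by
  induction pre with
  | nil => simp [pvWords]
  | cons x xs ih =>
      simp only [List.mem_cons, not_or] at h
      have hx : ¬ x = " " := fun hh => h.1 (Eq.symm hh)
      simp [pvWords, hx, ih h.2]

lemma B_eq_words (xs : List String) :
    word_separator_alt xs = (pvWords xs).map bClean := by
  induction hn : xs.length using Nat.strong_induction_on generalizing xs with
  | _ n ih =>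
  rw [word_separator_alt]
  split
  next i h =>
      obtain ⟨pre, suf, hxs, hlen, hnot⟩ := (PySem.List.index?_eq_some_iff xs " " i).1 h
      have hcast : ((i : Int) + 1) = ((i + 1 : Nat) : Int) := by push_cast; ring
      rw [PySem.List.slice_to_natCast, hcast, PySem.List.slice_from_natCast]
      have htake : xs.take i = pre := by
        rw [hxs, ← hlen, List.take_left]
      have hdrop : xs.drop (i + 1) = suf := by
        have h2 : pre ++ " " :: suf = (pre ++ [" "]) ++ suf := by simp
        rw [hxs, h2, ← hlen]
        rw [show pre.length + 1 = (pre ++ [" "]).length by simp, List.drop_left]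
      have hrec := ih suf.length (by subst hn; rw [hxs]; simp; omega) suf rfl
      rw [htake, hdrop, hrec, hxs, pvWords_split pre suf hnot]
      simp
  next h =>
      have hm : " " ∉ xs := (PySem.List.index?_eq_none_iff xs " ").1 h
      simp [pvWords_no_space xs hm]

-- ===== VERDICT (by name: the statement is the Claim_ definition above) =====
theorem word_separator_spec : Claim_equal_word_separator := by
  intro List_ _
  show word_separator List_ = word_separator_alt List_
  rw [A_eq_words, B_eq_words]
  exact List.map_congr_left (fun w _ => (bClean_eq_aFlush w).symm)
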